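-- pv_equiv track=rewrite | github.com/JackRao123/video-processor-public | watermark remover.py | find_bounds_of_cluster
-- ===== SOURCE A (Python) =====
-- def find_bounds_of_cluster(cluster):
--     x_arr = []
--     y_arr = []
--
--     for pixel in cluster:
--         x_arr.append(pixel[0])
--         y_arr.append(pixel[1])
--
--     min_x = min(x_arr)
--     max_x = max(x_arr)
--     min_y = min(y_arr)  # (0,0) is top left corner, (width, height) is bottom right corner which is why "top" is "min"
--     max_y = max(y_arr)
--
--     left_bound = cluster[x_arr.index(min_x)]
--     right_bound = cluster[x_arr.index(max_x)]
--     top_bound = cluster[y_arr.index(min_y)]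
--     bottom_bound = cluster[y_arr.index(max_y)]
--
--     return (left_bound, top_bound, right_bound, bottom_bound)
-- ===== SOURCE B (Python) =====
-- def find_bounds_of_cluster(cluster):
--     if not cluster:
--         raise ValueError("min() arg is an empty sequence")
--     left = right = top = bottom = cluster[0]
--     for p in cluster[1:]:
--         if p[0] < left[0]:
--             left = p
--         if p[0] > right[0]:
--             right = p
--         if p[1] < top[1]:
--             top = p
--         if p[1] > bottom[1]:
--             bottom = p
--     return (left, top, right, bottom)
-- ===== Notes on version B (the rewrite author's own statement) =====
-- stated objective: simpler
-- what changed: Replaces the two projected arrays, four min/max passes and four list.index scans with one single pass that maintains the four bound pixels directly (strict comparisons keep first-occurrence tie-breaking).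
import Mathlib
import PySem

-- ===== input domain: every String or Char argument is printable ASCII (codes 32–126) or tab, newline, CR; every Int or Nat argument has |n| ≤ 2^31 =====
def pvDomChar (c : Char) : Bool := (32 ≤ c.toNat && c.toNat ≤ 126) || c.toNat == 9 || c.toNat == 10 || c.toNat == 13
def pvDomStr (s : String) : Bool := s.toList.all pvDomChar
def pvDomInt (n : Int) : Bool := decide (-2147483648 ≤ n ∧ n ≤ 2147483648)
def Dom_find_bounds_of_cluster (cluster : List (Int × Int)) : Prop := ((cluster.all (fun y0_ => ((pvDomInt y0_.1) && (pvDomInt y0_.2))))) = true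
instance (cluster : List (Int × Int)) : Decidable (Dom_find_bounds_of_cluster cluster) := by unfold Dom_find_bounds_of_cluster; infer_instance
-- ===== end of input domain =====

-- B replaces A's projected arrays, four min/max passes and four .index scans by one
-- single pass that maintains the four bound pixels directly (objective: simpler).

-- ===== PORT A =====
-- cluster[arr.index(v)] : first index of v in arr, then pyGet? on cluster.
-- The (0,0) defaults are unreachable when the index exists and is in range.
def pvBoundBy (cluster : List (Int × Int)) (vals : List Int) (v : Int) : Int × Int :=
  match PySem.List.index? vals v with
  | some i => (PySem.List.pyGet? cluster (i : Int)).getD (0, 0)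
  | none => (0, 0)

def find_bounds_of_cluster (cluster : List (Int × Int)) : (Int × Int) × (Int × Int) × (Int × Int) × (Int × Int) :=
  let xy := cluster.foldl (fun (acc : List Int × List Int) pixel => (acc.1 ++ [pixel.1], acc.2 ++ [pixel.2])) ([], [])
  let x_arr := xy.1
  let y_arr := xy.2
  match PySem.List.min? x_arr (fun v => v), PySem.List.max? x_arr (fun v => v),
        PySem.List.min? y_arr (fun v => v), PySem.List.max? y_arr (fun v => v) with
  | some min_x, some max_x, some min_y, some max_y =>
      (pvBoundBy cluster x_arr min_x, pvBoundBy cluster y_arr min_y,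
       pvBoundBy cluster x_arr max_x, pvBoundBy cluster y_arr max_y)
  | _, _, _, _ => ((0, 0), (0, 0), (0, 0), (0, 0))  -- unreachable: Python raises ValueError on []

-- ===== PORT B =====
def find_bounds_of_cluster_alt (cluster : List (Int × Int)) : (Int × Int) × (Int × Int) × (Int × Int) × (Int × Int) :=
  match cluster with
  | [] => ((0, 0), (0, 0), (0, 0), (0, 0))  -- Python B raises ValueError here (outside Pre_)
  | first :: rest =>
      -- state: (left, right, top, bottom)
      let s := rest.foldl
        (fun (s : (Int × Int) × (Int × Int) × (Int × Int) × (Int × Int)) p =>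
          ((if p.1 < s.1.1 then p else s.1),
           (if p.1 > s.2.1.1 then p else s.2.1),
           (if p.2 < s.2.2.1.2 then p else s.2.2.1),
           (if p.2 > s.2.2.2.2 then p else s.2.2.2)))
        (first, first, first, first)
      (s.1, s.2.2.1, s.2.1, s.2.2.2)

-- ===== PRECONDITION & SPEC =====
-- Pre_ excludes exactly the empty cluster, on which A raises ValueError (min of an empty list).
def Pre_find_bounds_of_cluster (cluster : List (Int × Int)) : Prop := cluster ≠ []
instance (cluster : List (Int × Int)) : Decidable (Pre_find_bounds_of_cluster cluster) := by unfold Pre_find_bounds_of_cluster; infer_instance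
def pvWitness_find_bounds_of_cluster : (List (Int × Int)) := [(1, 2)]

def Spec_find_bounds_of_cluster (cluster : List (Int × Int)) (out : (Int × Int) × (Int × Int) × (Int × Int) × (Int × Int)) : Prop := out = find_bounds_of_cluster_alt cluster
instance (cluster : List (Int × Int)) (out : (Int × Int) × (Int × Int) × (Int × Int) × (Int × Int)) : Decidable (Spec_find_bounds_of_cluster cluster out) := by unfold Spec_find_bounds_of_cluster; infer_instance

-- ===== CLAIM (what is proved, stated in full; the proofs are below) =====
def Claim_equal_find_bounds_of_cluster : Prop := ∀ (cluster : List (Int × Int)), Dom_find_bounds_of_cluster cluster → Pre_find_bounds_of_cluster cluster → Spec_find_bounds_of_cluster cluster (find_bounds_of_cluster cluster)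

-- ===== LEMMAS AND PROOFS =====

-- A's array-building loop is the pair of projections.
theorem pv_build (l : List (Int × Int)) (a b : List Int) :
    l.foldl (fun (acc : List Int × List Int) pixel => (acc.1 ++ [pixel.1], acc.2 ++ [pixel.2])) (a, b)
      = (a ++ l.map Prod.fst, b ++ l.map Prod.snd) := by
  induction l generalizing a b with
  | nil => simp
  | cons p t ih => simp [List.foldl_cons, ih]

-- B's 4-component fold splits into four independent folds.
theorem pv_split4 (l : List (Int × Int)) (a b c d : Int × Int) :
    l.foldl
      (fun (s : (Int × Int) × (Int × Int) × (Int × Int) × (Int × Int)) p =>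
        ((if p.1 < s.1.1 then p else s.1),
         (if p.1 > s.2.1.1 then p else s.2.1),
         (if p.2 < s.2.2.1.2 then p else s.2.2.1),
         (if p.2 > s.2.2.2.2 then p else s.2.2.2))) (a, b, c, d)
      = (l.foldl (fun a p => if p.1 < a.1 then p else a) a,
         l.foldl (fun b p => if p.1 > b.1 then p else b) b,
         l.foldl (fun c p => if p.2 < c.2 then p else c) c,
         l.foldl (fun d p => if p.2 > d.2 then p else d) d) := by
  induction l generalizing a b c d with
  | nil => simp
  | cons p t ih => simp [List.foldl_cons, ih]

theorem pv_foldl_min_le (l : List Int) (x : Int) : l.foldl min x ≤ x := by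
  induction l generalizing x with
  | nil => simp
  | cons a t ih => exact le_trans (ih (min x a)) (min_le_left _ _)

theorem pv_le_foldl_max (l : List Int) (x : Int) : x ≤ l.foldl max x := by
  induction l generalizing x with
  | nil => simp
  | cons a t ih => exact le_trans (le_max_left _ _) (ih (max x a))

-- One step of A's min-search agrees with one step of B's selection.
theorem pv_boundMin_cons (key : Int × Int → Int) (p q : Int × Int) (rest : List (Int × Int)) :
    pvBoundBy (p :: q :: rest) (List.map key (p :: q :: rest)) ((List.map key rest).foldl min (min (key p) (key q)))
      = pvBoundBy ((if key q < key p then q else p) :: rest)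
          (List.map key ((if key q < key p then q else p) :: rest))
          ((List.map key rest).foldl min (key (if key q < key p then q else p))) := by
  have hm := pv_foldl_min_le (List.map key rest) (min (key p) (key q))
  by_cases hq : key q < key p
  · -- merged = q; key p ≠ m since m ≤ key q < key p
    have hmin : min (key p) (key q) = key q := min_eq_right (le_of_lt hq)
    have hm2 := pv_foldl_min_le (List.map key rest) (key q)
    have hpne : key p ≠ (List.map key rest).foldl min (key q) := by omega
    simp only [if_pos hq, hmin, pvBoundBy, List.map_cons]
    rw [PySem.List.index?_cons_of_ne _ hpne]
    cases hidx : PySem.List.index? (key q :: List.map key rest) ((List.map key rest).foldl min (key q)) with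
    | none => simp
    | some j =>
        simp only [Option.map_some]
        rw [PySem.List.pyGet?_natCast]
        simp
  · -- merged = p
    have hle : key p ≤ key q := le_of_not_gt hq
    have hmin : min (key p) (key q) = key p := min_eq_left hle
    rw [hmin] at hm
    by_cases hp : key p = (List.map key rest).foldl min (key p)
    · simp only [if_neg hq, hmin, pvBoundBy, List.map_cons]
      rw [← hp, PySem.List.index?_cons_self, PySem.List.index?_cons_self]
      simp
    · have hqne : key q ≠ (List.map key rest).foldl min (key p) := by
        intro h; omega
      simp only [if_neg hq, hmin, pvBoundBy, List.map_cons]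
      rw [PySem.List.index?_cons_of_ne _ hp, PySem.List.index?_cons_of_ne _ hqne,
          PySem.List.index?_cons_of_ne _ hp]
      cases hidx : PySem.List.index? (List.map key rest) ((List.map key rest).foldl min (key p)) with
      | none => simp
      | some j =>
          simp only [Option.map_some]
          rw [PySem.List.pyGet?_natCast]
          simp

theorem pv_boundMax_cons (key : Int × Int → Int) (p q : Int × Int) (rest : List (Int × Int)) :
    pvBoundBy (p :: q :: rest) (List.map key (p :: q :: rest)) ((List.map key rest).foldl max (max (key p) (key q)))
      = pvBoundBy ((if key q > key p then q else p) :: rest)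
          (List.map key ((if key q > key p then q else p) :: rest))
          ((List.map key rest).foldl max (key (if key q > key p then q else p))) := by
  have hm := pv_le_foldl_max (List.map key rest) (max (key p) (key q))
  by_cases hq : key q > key p
  · -- merged = q; key p ≠ m since m ≤ key q > key p
    have hmax : max (key p) (key q) = key q := max_eq_right (le_of_lt hq)
    have hm2 := pv_le_foldl_max (List.map key rest) (key q)
    have hpne : key p ≠ (List.map key rest).foldl max (key q) := by omega
    simp only [if_pos hq, hmax, pvBoundBy, List.map_cons]
    rw [PySem.List.index?_cons_of_ne _ hpne]
    cases hidx : PySem.List.index? (key q :: List.map key rest) ((List.map key rest).foldl max (key q)) with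
    | none => simp
    | some j =>
        simp only [Option.map_some]
        rw [PySem.List.pyGet?_natCast]
        simp
  · -- merged = p
    have hle : key q ≤ key p := le_of_not_gt hq
    have hmax : max (key p) (key q) = key p := max_eq_left hle
    rw [hmax] at hm
    by_cases hp : key p = (List.map key rest).foldl max (key p)
    · simp only [if_neg hq, hmax, pvBoundBy, List.map_cons]
      rw [← hp, PySem.List.index?_cons_self, PySem.List.index?_cons_self]
      simp
    · have hqne : key q ≠ (List.map key rest).foldl max (key p) := by
        intro h; omega
      simp only [if_neg hq, hmax, pvBoundBy, List.map_cons]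
      rw [PySem.List.index?_cons_of_ne _ hp, PySem.List.index?_cons_of_ne _ hqne,
          PySem.List.index?_cons_of_ne _ hp]
      cases hidx : PySem.List.index? (List.map key rest) ((List.map key rest).foldl max (key p)) with
      | none => simp
      | some j =>
          simp only [Option.map_some]
          rw [PySem.List.pyGet?_natCast]
          simp

-- A's "index of the min" equals B's strict-comparison fold (first occurrence wins).
theorem pv_boundMin (key : Int × Int → Int) (l : List (Int × Int)) (p : Int × Int) :
    pvBoundBy (p :: l) (List.map key (p :: l)) ((List.map key l).foldl min (key p))
      = l.foldl (fun a q => if key q < key a then q else a) p := by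
  induction l generalizing p with
  | nil =>
      simp [pvBoundBy]
  | cons q rest ih =>
      have step := pv_boundMin_cons key p q rest
      simp only [List.map_cons, List.foldl_cons] at step ⊢
      rw [step, ← List.map_cons, ih]

theorem pv_boundMax (key : Int × Int → Int) (l : List (Int × Int)) (p : Int × Int) :
    pvBoundBy (p :: l) (List.map key (p :: l)) ((List.map key l).foldl max (key p))
      = l.foldl (fun a q => if key q > key a then q else a) p := by
  induction l generalizing p with
  | nil =>
      simp [pvBoundBy]
  | cons q rest ih =>
      have step := pv_boundMax_cons key p q rest
      simp only [List.map_cons, List.foldl_cons] at step ⊢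
      rw [step, ← List.map_cons, ih]

-- ===== VERDICT (by name: the statement is the Claim_ definition above) =====
theorem find_bounds_of_cluster_spec : Claim_equal_find_bounds_of_cluster := by
  intro cluster _ hpre
  unfold Spec_find_bounds_of_cluster
  match cluster with
  | [] => exact absurd rfl hpre
  | p :: rest =>
      unfold find_bounds_of_cluster find_bounds_of_cluster_alt
      simp only [pv_build, List.nil_append, pv_split4]
      rw [show (p :: rest).map Prod.fst = List.map Prod.fst (p :: rest) from rfl,
          show (p :: rest).map Prod.snd = List.map Prod.snd (p :: rest) from rfl]
      simp only [List.map_cons, PySem.List.min?_id_cons, PySem.List.max?_id_cons]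
      rw [show ∀ t : List Int, t.foldl min (Prod.fst p) = t.foldl min ((fun x : Int × Int => x.1) p) from fun _ => rfl]
      simp only [← List.map_cons]
      rw [pv_boundMin (fun x => x.1) rest p, pv_boundMax (fun x => x.1) rest p,
          pv_boundMin (fun x => x.2) rest p, pv_boundMax (fun x => x.2) rest p]
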